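-- pv_equiv track=rewrite | github.com/QS1314520ZHOU/icu_anesthesia_project | 表格数据生成.py | next_prefix
-- ===== SOURCE A (Python) =====
-- def next_prefix(prefix):
--     chars = list(prefix)
--     i = len(chars) - 1
--     while i >= 0:
--         if chars[i] < 'z':
--             chars[i] = chr(ord(chars[i]) + 1)
--             return ''.join(chars)
--         else:
--             chars[i] = 'a'
--             i -= 1
--     return 'a' + ''.join(chars)
-- ===== SOURCE B (Python) =====
-- def next_prefix(prefix):
--     if not prefix:
--         return 'a'
--     last = prefix[-1]
--     if last < 'z':
--         return prefix[:-1] + chr(ord(last) + 1)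
--     return next_prefix(prefix[:-1]) + 'a'
-- ===== Notes on version B (the rewrite author's own statement) =====
-- stated objective: alternative
-- what changed: Replaces A's imperative index-walking loop that mutates a character list in place and rejoins it with a structural recursion on the string: the empty string maps to the first letter, otherwise the last character is bumped if it can be, else the function recurses on the shortened string and appends the first letter.
import Mathlib
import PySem

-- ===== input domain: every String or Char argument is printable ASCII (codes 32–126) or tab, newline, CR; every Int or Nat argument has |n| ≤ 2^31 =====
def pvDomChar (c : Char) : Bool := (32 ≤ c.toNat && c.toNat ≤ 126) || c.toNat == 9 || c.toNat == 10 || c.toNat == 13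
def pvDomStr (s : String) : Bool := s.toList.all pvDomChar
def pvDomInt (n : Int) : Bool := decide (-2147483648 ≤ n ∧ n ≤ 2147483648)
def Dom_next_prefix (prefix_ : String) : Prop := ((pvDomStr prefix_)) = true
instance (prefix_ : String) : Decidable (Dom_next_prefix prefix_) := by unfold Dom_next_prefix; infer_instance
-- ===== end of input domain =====

-- B replaces A's imperative index-walking loop mutating a character list with a structural
-- recursion on the string ('' -> "a"; bump the last char if it can be; else recurse on the
-- shortened string and append 'a'); objective: alternative decomposition, same result.

-- ===== PORT A =====
-- the while loop of A: argument m = i + 1 (m = 0 means i = -1, loop has exited)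
def pvALoop : List Char → Nat → String
  | chars, 0 => String.ofList ('a' :: chars)          -- return 'a' + ''.join(chars)
  | chars, m + 1 =>
      let c := chars.getD m ' '                       -- chars[i] (always in range in A)
      if c < 'z' then
        String.ofList (chars.set m (Char.ofNat (c.toNat + 1)))  -- chars[i] = chr(ord(chars[i])+1); join
      else
        pvALoop (chars.set m 'a') m                   -- chars[i] = 'a'; i -= 1

def next_prefix (prefix_ : String) : String :=
  let chars := prefix_.toList
  pvALoop chars chars.length

-- ===== PORT B =====
-- structural recursion of Source B, on the string's character list
def pvBRec (l : List Char) : List Char :=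
  match h : l.getLast? with
  | none => ['a']                                                     -- if not prefix: return 'a'
  | some c =>
      if c < 'z' then l.dropLast ++ [Char.ofNat (c.toNat + 1)]        -- prefix[:-1] + chr(ord(last)+1)
      else pvBRec l.dropLast ++ ['a']                                 -- next_prefix(prefix[:-1]) + 'a'
termination_by l.length
decreasing_by
  have hne : l ≠ [] := by intro hnil; simp [hnil] at h
  have hpos : 0 < l.length := List.length_pos_iff.mpr hne
  simp [List.length_dropLast]; omega

def next_prefix_alt (prefix_ : String) : String :=
  String.ofList (pvBRec prefix_.toList)

-- ===== PRECONDITION & SPEC =====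
def Spec_next_prefix (prefix_ : String) (out : String) : Prop := out = next_prefix_alt prefix_
instance (prefix_ : String) (out : String) : Decidable (Spec_next_prefix prefix_ out) := by unfold Spec_next_prefix; infer_instance

-- ===== CLAIM (what is proved, stated in full; the proofs are below) =====
def Claim_equal_next_prefix : Prop := ∀ (prefix_ : String), Dom_next_prefix prefix_ → Spec_next_prefix prefix_ (next_prefix prefix_)

-- ===== LEMMAS AND PROOFS =====

theorem pvBRec_concat (u : List Char) (c : Char) :
    pvBRec (u ++ [c]) =
      if c < 'z' then u ++ [Char.ofNat (c.toNat + 1)] else pvBRec u ++ ['a'] := by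
  rw [pvBRec]
  split
  · rename_i h
    simp at h
  · rename_i c' h
    rw [List.getLast?_concat] at h
    obtain rfl : c = c' := by injection h
    rw [List.dropLast_concat]

theorem pvALoop_eq (u v : List Char) :
    pvALoop (u ++ v) u.length = String.ofList (pvBRec u ++ v) := by
  induction u using List.reverseRecOn generalizing v with
  | nil =>
    rw [pvBRec]
    simp [pvALoop]
  | append_singleton u' c ih =>
    have hlen : (u' ++ [c]).length = u'.length + 1 := by simp
    rw [List.append_assoc, List.singleton_append, hlen, pvALoop]
    have hget : (u' ++ (c :: v)).getD u'.length ' ' = c := by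
      rw [List.getD_eq_getElem _ _ (by simp), List.getElem_append_right (Nat.le_refl _)]
      simp
    have hset : ∀ x, (u' ++ (c :: v)).set u'.length x = u' ++ (x :: v) := by
      intro x
      rw [List.set_append_right _ _ (Nat.le_refl _)]
      simp
    simp only [hget, hset, pvBRec_concat]
    by_cases hc : c < 'z'
    · simp [hc]
    · rw [if_neg hc, if_neg hc, ih ('a' :: v)]
      simp

-- ===== VERDICT (by name: the statement is the Claim_ definition above) =====
theorem next_prefix_spec : Claim_equal_next_prefix := by
  intro p _
  unfold Spec_next_prefix next_prefix next_prefix_alt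
  simpa using pvALoop_eq p.toList []
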